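-- pv_equiv track=rewrite | github.com/FernE047/pythonscript | artificialInteligence/MarkovChainChat/storying/fazChains.py | generate_word_chain
-- ===== SOURCE A (Python) =====
-- def generate_word_chain(text: str) -> list[str]:
--     text = text.replace("\n", " ")
--     text = text.replace("\t", " ")
--     text = text.replace("“", '"')
--     text = text.replace("”", '"')
--     for spaced in [".", "-", ",", "!", "?", "(", "—", ")", ":", "...", "..", "/", "/"]:
--         text = text.replace(spaced, f" {spaced} ")
--     words = text.split()
--     text_word_count = len(words)
--     word_combinations: list[str] = []
--     phrase_chunk = " ".join(["¨" for _ in range(TAMANHO)] + [words[0]])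
--     word_combinations.append(phrase_chunk)
--     for n in range(text_word_count):
--         phrase_segment = words[n : n + TAMANHO + 1]
--         if len(phrase_segment) <= TAMANHO:
--             while len(phrase_segment) <= TAMANHO:
--                 phrase_segment.append("¨")
--             phrase_chunk = " ".join(phrase_segment)
--             word_combinations.append(phrase_chunk)
--             break
--         phrase_chunk = " ".join(phrase_segment)
--         word_combinations.append(phrase_chunk)
--     return word_combinations
--
-- TAMANHO = 1
-- ===== SOURCE B (Python) =====
-- def generate_word_chain(text: str) -> list[str]:
--     text = text.replace("\n", " ")
--     text = text.replace("\t", " ")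
--     text = text.replace("“", '"')
--     text = text.replace("”", '"')
--     for spaced in [".", "-", ",", "!", "?", "(", "—", ")", ":", "...", "..", "/", "/"]:
--         text = text.replace(spaced, f" {spaced} ")
--     words = text.split()
--     padded = ["¨"] + words + ["¨"]
--     chain: list[str] = []
--     prev = padded[0]
--     for word in padded[1:]:
--         chain.append(prev + " " + word)
--         prev = word
--     return chain
-- ===== Notes on version B (the rewrite author's own statement) =====
-- stated objective: simpler
-- what changed: A builds a special sentinel-prefixed first chunk, then loops over indices slicing words[n:n+2] with a pad-and-break branch for the short tail; B instead pads the word list once with a sentinel on each end and makes one uniform pass carrying the previous word, so both special cases (prefix chunk and tail padding) disappear.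
import Mathlib
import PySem

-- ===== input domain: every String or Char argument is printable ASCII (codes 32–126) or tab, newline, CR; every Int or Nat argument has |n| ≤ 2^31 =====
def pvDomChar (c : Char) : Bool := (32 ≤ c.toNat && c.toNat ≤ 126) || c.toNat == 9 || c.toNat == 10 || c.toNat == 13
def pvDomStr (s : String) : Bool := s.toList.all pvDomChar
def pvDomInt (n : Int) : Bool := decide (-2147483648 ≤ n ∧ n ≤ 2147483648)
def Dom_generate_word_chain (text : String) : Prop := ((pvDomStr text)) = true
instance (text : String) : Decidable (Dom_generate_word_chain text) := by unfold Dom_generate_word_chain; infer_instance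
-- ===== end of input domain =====

-- B pads the word list once with a sentinel at each end and makes one uniform pass carrying the
-- previous word, so A's special prefix chunk and its slice/pad-and-break loop both disappear (simpler).

-- ===== PORT A =====
-- module constant TAMANHO = 1
def pvTAMANHO : Int := 1

-- the preprocessing (replacement passes + split) is textually identical in A and in B; shared helper
def pvWords (text : String) : List String :=
  let t := PySem.Str.replace text "\n" " "
  let t := PySem.Str.replace t "\t" " "
  let t := PySem.Str.replace t "“" "\""
  let t := PySem.Str.replace t "”" "\""
  let t := ([".", "-", ",", "!", "?", "(", "—", ")", ":", "...", "..", "/", "/"]).foldl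
    (fun t sp => PySem.Str.replace t sp (" " ++ sp ++ " ")) t
  PySem.Str.split₀ t

-- A's inner `while len(phrase_segment) <= TAMANHO: phrase_segment.append("¨")`
def pvPad (seg : List String) : List String :=
  if seg.length ≤ 1 then pvPad (seg ++ ["¨"]) else seg
  termination_by 2 - seg.length
  decreasing_by simp; omega

-- A's `for n in range(text_word_count): …` with its break
def pvLoopA (ws : List String) (idxs : List Int) (acc : List String) : List String :=
  match idxs with
  | [] => acc
  | n :: rest =>
    let seg := PySem.List.slice ws (some n) (some (n + pvTAMANHO + 1))
    if seg.length ≤ pvTAMANHO.toNat then acc ++ [PySem.Str.join " " (pvPad seg)]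
    else pvLoopA ws rest (acc ++ [PySem.Str.join " " seg])

def generate_word_chain (text : String) : List String :=
  let words := pvWords text
  -- words[0] raises IndexError on an all-whitespace text: excluded by Pre_ below
  let chunk0 := PySem.Str.join " "
    (((PySem.List.pyRange 0 pvTAMANHO 1).map (fun _ => "¨")) ++ [PySem.List.pyGetD words 0 ""])
  pvLoopA words (PySem.List.pyRange 0 (words.length : Int) 1) [chunk0]

-- ===== PORT B =====
-- B's `for word in padded[1:]` loop, carrying `prev` and appending to `chain`
def pvLoopB (prev : String) (rest : List String) (chain : List String) : List String :=
  match rest with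
  | [] => chain
  | w :: t => pvLoopB w t (chain ++ [prev ++ " " ++ w])

def generate_word_chain_alt (text : String) : List String :=
  let words := pvWords text
  let padded := "¨" :: (words ++ ["¨"])
  -- padded[0] and padded[1:] (always in range: padded is nonempty by construction)
  pvLoopB (PySem.List.pyGetD padded 0 "") (padded.drop 1) []

-- ===== PRECONDITION & SPEC =====
-- Pre_ excludes exactly the whitespace-only texts, on which A raises IndexError at words[0].
def Pre_generate_word_chain (text : String) : Prop :=
  text.toList.any (fun c => !(c == ' ' || c == '\t' || c == '\n' || c == '\r')) = true
instance (text : String) : Decidable (Pre_generate_word_chain text) := by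
  unfold Pre_generate_word_chain; infer_instance

def pvWitness_generate_word_chain : String := "hello, world"

def Spec_generate_word_chain (text : String) (out : List String) : Prop := out = generate_word_chain_alt text
instance (text : String) (out : List String) : Decidable (Spec_generate_word_chain text out) := by unfold Spec_generate_word_chain; infer_instance

-- ===== CLAIM (what is proved, stated in full; the proofs are below) =====
def Claim_equal_generate_word_chain : Prop := ∀ (text : String), Dom_generate_word_chain text → Pre_generate_word_chain text → Spec_generate_word_chain text (generate_word_chain text)

-- ===== LEMMAS AND PROOFS =====

theorem pv_join2 (a b : String) : PySem.Str.join " " [a, b] = a ++ " " ++ b := by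
  rw [← String.ofList_toList (s := a ++ " " ++ b)]
  simp [PySem.Str.join, PySem.Chars.join, List.intercalate, String.toList_append]

-- the consecutive-pair chunks of a list (proof-side characterisation of both loops)
def pvPairs (l : List String) : List String :=
  (l.zip (l.drop 1 ++ ["¨"])).map (fun p => PySem.Str.join " " [p.1, p.2])

theorem pvPairs_cons_cons (a b : String) (t : List String) :
    pvPairs (a :: b :: t) = PySem.Str.join " " [a, b] :: pvPairs (b :: t) := by
  simp [pvPairs]

theorem pvPad_singleton (a : String) : pvPad [a] = [a, "¨"] := by
  rw [pvPad]; simp; rw [pvPad]; simp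

theorem pvLoopA_eq (ws : List String) :
    ∀ (d n : Nat), ws.length - n ≤ d → n < ws.length → ∀ acc,
      pvLoopA ws (PySem.List.pyRange (n : Int) (ws.length : Int) 1) acc =
        acc ++ pvPairs (ws.drop n) := by
  intro d
  induction d with
  | zero => intro n hd hn acc; omega
  | succ d ih =>
    intro n hd hn acc
    rw [PySem.List.pyRange_one_cons (by exact_mod_cast hn)]
    have hseg : PySem.List.slice ws (some (n : Int)) (some ((n : Int) + pvTAMANHO + 1)) =
        (ws.drop n).take 2 := by
      have : ((n : Int) + pvTAMANHO + 1) = ((n + 2 : Nat) : Int) := by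
        simp [pvTAMANHO]; omega
      rw [this, PySem.List.slice_natCast]
      congr 1; omega
    obtain ⟨a, t, hat⟩ : ∃ a t, ws.drop n = a :: t := by
      cases h : ws.drop n with
      | nil => exfalso; have := List.length_drop (l := ws) (i := n); rw [h] at this; simp at this; omega
      | cons a t => exact ⟨a, t, rfl⟩
    cases t with
    | nil =>
      simp only [pvLoopA, hseg, hat]
      rw [if_pos (by simp [pvTAMANHO])]
      simp [pvPad_singleton, pvPairs]
    | cons b t' =>
      simp only [pvLoopA, hseg, hat]
      rw [if_neg (by simp [pvTAMANHO])]
      have hlen : n + 1 < ws.length := by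
        have := List.length_drop (l := ws) (i := n); rw [hat] at this; simp at this; omega
      have : ((n : Int) + 1) = (((n + 1 : Nat)) : Int) := by push_cast; ring
      rw [this, ih (n + 1) (by omega) hlen]
      have hdrop : ws.drop (n + 1) = b :: t' := by
        have : ws.drop (n+1) = (ws.drop n).tail := by
          rw [← List.drop_drop]; simp
        rw [this, hat]; rfl
      rw [hdrop, pvPairs_cons_cons]
      simp

-- B's loop computes the chain of a sentinel-terminated list
def pvChain (prev : String) (l : List String) : List String :=
  match l with
  | [] => []
  | w :: t => (prev ++ " " ++ w) :: pvChain w t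

theorem pvLoopB_eq (l : List String) : ∀ prev acc,
    pvLoopB prev l acc = acc ++ pvChain prev l := by
  induction l with
  | nil => intro prev acc; simp [pvLoopB, pvChain]
  | cons w t ih => intro prev acc; simp [pvLoopB, pvChain, ih]

theorem pvChain_eq_pvPairs (l : List String) : ∀ a,
    pvChain a (l ++ ["¨"]) = pvPairs (a :: l) := by
  induction l with
  | nil => intro a; simp [pvChain, pvPairs, pv_join2]
  | cons b t ih =>
    intro a
    rw [pvPairs_cons_cons, pv_join2]
    simpa [pvChain] using ih b

-- membership survives Python str.replace when the removed char either is not tracked or reappears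
theorem pv_mem_replace_go (c : Char) (old new : List Char) :
    ∀ (fuel : Nat) (l acc : List Char), (c ∈ l ∨ c ∈ acc) → (c ∉ old ∨ c ∈ new) →
      c ∈ PySem.Chars.replace.go old new fuel l acc := by
  intro fuel
  induction fuel with
  | zero =>
    intro l acc h _
    simp only [PySem.Chars.replace.go]
    rcases h with h | h <;> simp [h]
  | succ f ih =>
    intro l acc h hcond
    match l with
    | [] =>
      simp only [PySem.Chars.replace.go]
      rcases h with h | h
      · simp at h
      · simp [h]
    | c0 :: t =>
      simp only [PySem.Chars.replace.go]
      split
      · rename_i hpre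
        have hp : old <+: (c0 :: t) := List.isPrefixOf_iff_prefix.mp hpre
        have heq : old ++ (c0 :: t).drop old.length = c0 :: t :=
          List.prefix_iff_eq_append.mp hp
        apply ih
        · rcases h with h | h
          · rw [← heq] at h
            rcases List.mem_append.mp h with h | h
            · rcases hcond with hc | hc
              · exact absurd h hc
              · right; simp [hc]
            · left; exact h
          · right; simp [h]
        · exact hcond
      · apply ih
        · rcases h with h | h
          · rcases List.mem_cons.mp h with h | h
            · right; simp [h]
            · left; exact h
          · right; simp [h]
        · exact hcond

theorem pv_mem_replace (c : Char) (s old new : String)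
    (hs : c ∈ s.toList) (hcond : c ∉ old.toList ∨ c ∈ new.toList) :
    c ∈ (PySem.Str.replace s old new).toList := by
  rw [PySem.Str.toList_replace]
  unfold PySem.Chars.replace
  split
  · rename_i he
    have : old.toList = [] := by simpa [List.isEmpty_iff] using he
    simp only [List.mem_append, List.mem_flatMap]
    right; exact ⟨c, hs, by simp⟩
  · exact pv_mem_replace_go c old.toList new.toList s.toList.length s.toList [] (Or.inl hs) hcond

-- str.split() is nonempty as soon as some non-whitespace char is present
theorem pv_split₀_go_ne_nil :
    ∀ (s : List Char) (cur : List Char) (acc : List (List Char)),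
      (cur ≠ [] ∨ acc ≠ [] ∨ ∃ c ∈ s, PySem.Chars.isspace c = false) →
      PySem.Chars.split₀.go s cur acc ≠ [] := by
  intro s
  induction s with
  | nil =>
    intro cur acc h
    simp only [PySem.Chars.split₀.go]
    rcases h with h | h | h
    · rw [if_neg (by simpa [List.isEmpty_iff] using h)]; simp
    · split <;> simp [h]
    · simp at h
  | cons c0 t ih =>
    intro cur acc h
    simp only [PySem.Chars.split₀.go]
    by_cases hsp : PySem.Chars.isspace c0 = true
    · rw [if_pos hsp]
      by_cases hcur : cur.isEmpty = true
      · rw [if_pos hcur]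
        apply ih
        rcases h with h | h | h
        · exact absurd (by simpa [List.isEmpty_iff] using hcur) h
        · right; left; exact h
        · right; right
          obtain ⟨c, hc, hcs⟩ := h
          rcases List.mem_cons.mp hc with rfl | hc
          · rw [hsp] at hcs; cases hcs
          · exact ⟨c, hc, hcs⟩
      · rw [if_neg hcur]
        apply ih
        right; left; simp
    · rw [if_neg hsp]
      apply ih
      left; simp

-- under Dom, any char other than the four excluded whitespace chars is not Python whitespace
theorem pv_not_isspace (c : Char) (hdom : pvDomChar c = true)
    (h1 : (c == ' ' || c == '\t' || c == '\n' || c == '\r') = false) :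
    PySem.Chars.isspace c = false := by
  have h32 : c.toNat ≠ 32 := fun h => by
    have : c = ' ' := Char.ext (UInt32.toNat_inj.mp (show c.val.toNat = (' ' : Char).val.toNat from h))
    simp [this] at h1
  have h9 : c.toNat ≠ 9 := fun h => by
    have : c = '\t' := Char.ext (UInt32.toNat_inj.mp (show c.val.toNat = ('\t' : Char).val.toNat from h))
    simp [this] at h1
  have h10 : c.toNat ≠ 10 := fun h => by
    have : c = '\n' := Char.ext (UInt32.toNat_inj.mp (show c.val.toNat = ('\n' : Char).val.toNat from h))
    simp [this] at h1
  have h13 : c.toNat ≠ 13 := fun h => by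
    have : c = '\r' := Char.ext (UInt32.toNat_inj.mp (show c.val.toNat = ('\r' : Char).val.toNat from h))
    simp [this] at h1
  simp only [pvDomChar, Bool.or_eq_true, Bool.and_eq_true, decide_eq_true_eq, beq_iff_eq] at hdom
  simp only [PySem.Chars.isspace, Bool.or_eq_false_iff, Bool.and_eq_false_iff,
    decide_eq_false_iff_not]
  omega

-- membership survives the whole foldl of punctuation replacements (each reinserts its pattern)
theorem pv_mem_foldl (c : Char) :
    ∀ (sps : List String) (t : String), c ∈ t.toList →
      c ∈ ((sps.foldl (fun t sp => PySem.Str.replace t sp (" " ++ sp ++ " ")) t)).toList := by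
  intro sps
  induction sps with
  | nil => intro t h; simpa using h
  | cons sp rest ih =>
    intro t h
    simp only [List.foldl_cons]
    apply ih
    apply pv_mem_replace c t sp _ h
    by_cases hc : c ∈ sp.toList
    · right; simp [String.toList_append, hc]
    · left; exact hc

theorem pv_words_ne_nil (text : String)
    (hdom : Dom_generate_word_chain text) (hpre : Pre_generate_word_chain text) :
    pvWords text ≠ [] := by
  unfold Pre_generate_word_chain at hpre
  rw [List.any_eq_true] at hpre
  obtain ⟨c, hc, hcb⟩ := hpre
  have hcb : (c == ' ' || c == '\t' || c == '\n' || c == '\r') = false := by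
    simpa using hcb
  have hcdom : pvDomChar c = true := by
    have := (List.all_eq_true.mp (by simpa [Dom_generate_word_chain, pvDomStr] using hdom)) c hc
    simpa using this
  have hcle : c.toNat ≤ 126 := by
    simp only [pvDomChar, Bool.or_eq_true, Bool.and_eq_true, decide_eq_true_eq, beq_iff_eq] at hcdom
    omega
  unfold pvWords
  show PySem.Str.split₀
      ((([".", "-", ",", "!", "?", "(", "—", ")", ":", "...", "..", "/", "/"] : List String)).foldl
        (fun t sp => PySem.Str.replace t sp (" " ++ sp ++ " "))
        (PySem.Str.replace (PySem.Str.replace (PySem.Str.replace (PySem.Str.replace text "\n" " ") "\t" " ") "“" "\"") "”" "\"")) ≠ []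
  intro hnil
  -- trace c through every replacement pass
  have h1 : c ∈ (PySem.Str.replace text "\n" " ").toList := by
    apply pv_mem_replace c text "\n" " " hc
    left; intro hm
    have : c = '\n' := by simpa using hm
    simp [this] at hcb
  have h2 : c ∈ (PySem.Str.replace (PySem.Str.replace text "\n" " ") "\t" " ").toList := by
    apply pv_mem_replace c _ "\t" " " h1
    left; intro hm
    have : c = '\t' := by simpa using hm
    simp [this] at hcb
  have h3 : c ∈ (PySem.Str.replace (PySem.Str.replace (PySem.Str.replace text "\n" " ") "\t" " ") "“" "\"").toList := by
    apply pv_mem_replace c _ "“" "\"" h2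
    left; intro hm
    have : c = '“' := by simpa using hm
    rw [this] at hcle; simp [Char.toNat] at hcle
  have h4 : c ∈ (PySem.Str.replace (PySem.Str.replace (PySem.Str.replace (PySem.Str.replace text "\n" " ") "\t" " ") "“" "\"") "”" "\"").toList := by
    apply pv_mem_replace c _ "”" "\"" h3
    left; intro hm
    have : c = '”' := by simpa using hm
    rw [this] at hcle; simp [Char.toNat] at hcle
  have h5 := pv_mem_foldl c ([".", "-", ",", "!", "?", "(", "—", ")", ":", "...", "..", "/", "/"]) _ h4
  -- the split of a string containing a non-whitespace char is nonempty
  have hmap := PySem.Str.split₀_map_toList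
    ((([".", "-", ",", "!", "?", "(", "—", ")", ":", "...", "..", "/", "/"] : List String)).foldl
      (fun t sp => PySem.Str.replace t sp (" " ++ sp ++ " "))
      (PySem.Str.replace (PySem.Str.replace (PySem.Str.replace (PySem.Str.replace text "\n" " ") "\t" " ") "“" "\"") "”" "\""))
  rw [hnil] at hmap
  have hnil' : PySem.Chars.split₀.go
      ((([".", "-", ",", "!", "?", "(", "—", ")", ":", "...", "..", "/", "/"] : List String)).foldl
        (fun t sp => PySem.Str.replace t sp (" " ++ sp ++ " "))
        (PySem.Str.replace (PySem.Str.replace (PySem.Str.replace (PySem.Str.replace text "\n" " ") "\t" " ") "“" "\"") "”" "\"")).toList [] [] = [] := by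
    have := hmap.symm
    simpa [PySem.Chars.split₀] using this
  exact pv_split₀_go_ne_nil _ [] [] (Or.inr (Or.inr ⟨c, h5, pv_not_isspace c hcdom hcb⟩)) hnil'

-- ===== VERDICT (by name: the statement is the Claim_ definition above) =====
theorem generate_word_chain_spec : Claim_equal_generate_word_chain := by
  intro text hdom hpre
  unfold Spec_generate_word_chain generate_word_chain generate_word_chain_alt
  simp only []
  cases hws : pvWords text with
  | nil => exact absurd hws (pv_words_ne_nil text hdom hpre)
  | cons w rest =>
    have h0 : (0 : Int) = ((0 : Nat) : Int) := rfl
    rw [h0, pvLoopA_eq (w :: rest) (w :: rest).length 0 (by omega) (by simp)]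
    rw [pvLoopB_eq]
    have : ((w :: rest) ++ ["¨"] : List String) = w :: (rest ++ ["¨"]) := by simp
    rw [show ("¨" :: ((w :: rest) ++ ["¨"]) : List String).drop 1 = (w :: rest) ++ ["¨"] by simp]
    rw [pvChain_eq_pvPairs, pvPairs_cons_cons]
    simp [pvTAMANHO, PySem.List.pyGetD_zero_cons, pv_join2]
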